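-- pv_equiv track=rewrite | github.com/pupcrafty/DiamondDrip | debughelper/microphone_info_server.py | get_device_type
-- ===== SOURCE A (Python) =====
-- def get_device_type(data):
--     """
--     Extract device type from the browser data
--     """
--     if 'browser' in data and isinstance(data['browser'], dict):
--         platform = data['browser'].get('platform', '').lower()
--         user_agent = data['browser'].get('userAgent', '').lower()
--
--         # Detect device type
--         if any(x in platform or x in user_agent for x in ['iphone', 'ipad', 'ipod']):
--             return 'ios'
--         elif 'android' in platform or 'android' in user_agent:
--             return 'android'
--         elif 'windows' in platform:
--             return 'windows'
--         elif 'mac' in platform or 'macintosh' in platform: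
--             return 'macos'
--         elif 'linux' in platform:
--             return 'linux'
--         elif any(x in user_agent for x in ['mobile', 'tablet']):
--             return 'mobile'
--         else:
--             return 'desktop'
--
--     return 'unknown'
-- ===== SOURCE B (Python) =====
-- # Different strategy: no ordered cascade/short-circuit scan. B tests EVERY token,
-- # collecting matches, and keeps the best (lowest-priority-index) label seen; the
-- # priority ranking encodes which classification wins when several tokens match.
-- _PRIORITY = ['ios', 'android', 'windows', 'macos', 'linux', 'mobile', 'desktop']
-- _TOKENS = {  # substring -> (label, fields it may occur in: p=platform, u=userAgent)
--     'iphone': ('ios', 'pu'),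
--     'ipad': ('ios', 'pu'),
--     'ipod': ('ios', 'pu'),
--     'android': ('android', 'pu'),
--     'windows': ('windows', 'p'),
--     'mac': ('macos', 'p'),
--     'macintosh': ('macos', 'p'),
--     'linux': ('linux', 'p'),
--     'mobile': ('mobile', 'u'),
--     'tablet': ('mobile', 'u'),
-- }
--
--
-- def get_device_type(data):
--     if 'browser' not in data or not isinstance(data['browser'], dict):
--         return 'unknown'
--     browser = data['browser']
--     platform = browser.get('platform', '').lower()
--     user_agent = browser.get('userAgent', '').lower()
--     best = 'desktop'
--     for sub, (label, fields) in _TOKENS.items():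
--         hit = ('p' in fields and sub in platform) or ('u' in fields and sub in user_agent)
--         if hit and _PRIORITY.index(label) < _PRIORITY.index(best):
--             best = label
--     return best
-- ===== Notes on version B (the rewrite author's own statement) =====
-- stated objective: alternative
-- what changed: Instead of an ordered short-circuit branch cascade, B tests every substring token in one full pass and keeps the matching label of highest priority via a min-index accumulator; the priority ranking replaces the branch order.
import Mathlib
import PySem

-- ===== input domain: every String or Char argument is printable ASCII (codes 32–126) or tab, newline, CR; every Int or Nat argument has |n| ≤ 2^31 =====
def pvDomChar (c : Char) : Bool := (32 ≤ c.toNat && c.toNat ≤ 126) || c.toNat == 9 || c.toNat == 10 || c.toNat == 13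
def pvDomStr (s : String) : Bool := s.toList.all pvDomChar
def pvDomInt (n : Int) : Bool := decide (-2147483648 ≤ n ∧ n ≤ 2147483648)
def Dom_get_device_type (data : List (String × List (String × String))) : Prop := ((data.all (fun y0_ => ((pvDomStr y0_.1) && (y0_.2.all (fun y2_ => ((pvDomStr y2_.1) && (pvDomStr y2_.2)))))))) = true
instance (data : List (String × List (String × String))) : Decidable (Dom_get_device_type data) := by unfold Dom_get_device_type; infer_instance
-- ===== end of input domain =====

-- B replaces A's ordered short-circuit cascade by a full pass over all tokens keeping the
-- highest-priority matching label; same return value everywhere.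

-- ===== PORT A =====
def get_device_type (data : List (String × List (String × String))) : String :=
  match data.find? (fun p => p.1 == "browser") with  -- 'browser' in data / data['browser']: first match in the assoc list
  | none => "unknown"
  | some (_, browser) =>
    -- isinstance(data['browser'], dict) is always true under the stated types
    let platform := PySem.Str.lower (((browser.find? (fun p => p.1 == "platform")).map Prod.snd).getD "")
    let user_agent := PySem.Str.lower (((browser.find? (fun p => p.1 == "userAgent")).map Prod.snd).getD "")
    if (["iphone", "ipad", "ipod"].any fun x =>
          PySem.Str.isIn x platform || PySem.Str.isIn x user_agent) then "ios"
    else if PySem.Str.isIn "android" platform || PySem.Str.isIn "android" user_agent then "android"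
    else if PySem.Str.isIn "windows" platform then "windows"
    else if PySem.Str.isIn "mac" platform || PySem.Str.isIn "macintosh" platform then "macos"
    else if PySem.Str.isIn "linux" platform then "linux"
    else if (["mobile", "tablet"].any fun x => PySem.Str.isIn x user_agent) then "mobile"
    else "desktop"

-- ===== PORT B =====
def pvPriority : List String := ["ios", "android", "windows", "macos", "linux", "mobile", "desktop"]

-- _TOKENS dict in insertion order: (substring, label, in-platform?, in-userAgent?)
def pvTokens : List (String × String × Bool × Bool) :=
  [ ("iphone", "ios", true, true),
    ("ipad", "ios", true, true),
    ("ipod", "ios", true, true),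
    ("android", "android", true, true),
    ("windows", "windows", true, false),
    ("mac", "macos", true, false),
    ("macintosh", "macos", true, false),
    ("linux", "linux", true, false),
    ("mobile", "mobile", false, true),
    ("tablet", "mobile", false, true) ]

-- _PRIORITY.index(l); every label B ever compares is in pvPriority, so index? is some
def pvIdx (l : String) : Nat := (PySem.List.index? pvPriority l).getD 0

def get_device_type_alt (data : List (String × List (String × String))) : String :=
  match data.find? (fun p => p.1 == "browser") with
  | none => "unknown"
  | some (_, browser) =>
    let platform := PySem.Str.lower (((browser.find? (fun p => p.1 == "platform")).map Prod.snd).getD "")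
    let user_agent := PySem.Str.lower (((browser.find? (fun p => p.1 == "userAgent")).map Prod.snd).getD "")
    pvTokens.foldl (fun best t =>
      let hit := (t.2.2.1 && PySem.Str.isIn t.1 platform) || (t.2.2.2 && PySem.Str.isIn t.1 user_agent)
      if hit && decide (pvIdx t.2.1 < pvIdx best) then t.2.1 else best) "desktop"

-- ===== PRECONDITION & SPEC =====
def Spec_get_device_type (data : List (String × List (String × String))) (out : String) : Prop := out = get_device_type_alt data
instance (data : List (String × List (String × String))) (out : String) : Decidable (Spec_get_device_type data out) := by unfold Spec_get_device_type; infer_instance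

-- ===== CLAIM =====
def Claim_equal_get_device_type : Prop := ∀ (data : List (String × List (String × String))), Dom_get_device_type data → Spec_get_device_type data (get_device_type data)

-- ===== LEMMAS AND PROOFS =====

theorem pvIdx_ios : pvIdx "ios" = 0 := by decide
theorem pvIdx_android : pvIdx "android" = 1 := by decide
theorem pvIdx_windows : pvIdx "windows" = 2 := by decide
theorem pvIdx_macos : pvIdx "macos" = 3 := by decide
theorem pvIdx_linux : pvIdx "linux" = 4 := by decide
theorem pvIdx_mobile : pvIdx "mobile" = 5 := by decide
theorem pvIdx_desktop : pvIdx "desktop" = 6 := by decide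

-- A's cascade equals B's min-priority fold, for any lower-cased platform P and user agent U:
-- sequential case analysis on the 14 membership tests (first hit decides both sides).
theorem pvKey (P U : String) :
    (if (["iphone", "ipad", "ipod"].any fun x =>
          PySem.Str.isIn x P || PySem.Str.isIn x U) then "ios"
    else if PySem.Str.isIn "android" P || PySem.Str.isIn "android" U then "android"
    else if PySem.Str.isIn "windows" P then "windows"
    else if PySem.Str.isIn "mac" P || PySem.Str.isIn "macintosh" P then "macos"
    else if PySem.Str.isIn "linux" P then "linux"
    else if (["mobile", "tablet"].any fun x => PySem.Str.isIn x U) then "mobile"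
    else "desktop") =
    pvTokens.foldl (fun best t =>
      let hit := (t.2.2.1 && PySem.Str.isIn t.1 P) || (t.2.2.2 && PySem.Str.isIn t.1 U)
      if hit && decide (pvIdx t.2.1 < pvIdx best) then t.2.1 else best) "desktop" := by
  cases h1 : PySem.Str.isIn "iphone" P with
  | true => simp_all [pvTokens, List.foldl_cons, List.foldl_nil, List.any_cons, List.any_nil, pvIdx_ios, pvIdx_android, pvIdx_windows, pvIdx_macos, pvIdx_linux, pvIdx_mobile, pvIdx_desktop]
  | false =>
    cases h2 : PySem.Str.isIn "iphone" U with
    | true => simp_all [pvTokens, List.foldl_cons, List.foldl_nil, List.any_cons, List.any_nil, pvIdx_ios, pvIdx_android, pvIdx_windows, pvIdx_macos, pvIdx_linux, pvIdx_mobile, pvIdx_desktop]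
    | false =>
      cases h3 : PySem.Str.isIn "ipad" P with
      | true => simp_all [pvTokens, List.foldl_cons, List.foldl_nil, List.any_cons, List.any_nil, pvIdx_ios, pvIdx_android, pvIdx_windows, pvIdx_macos, pvIdx_linux, pvIdx_mobile, pvIdx_desktop]
      | false =>
        cases h4 : PySem.Str.isIn "ipad" U with
        | true => simp_all [pvTokens, List.foldl_cons, List.foldl_nil, List.any_cons, List.any_nil, pvIdx_ios, pvIdx_android, pvIdx_windows, pvIdx_macos, pvIdx_linux, pvIdx_mobile, pvIdx_desktop]
        | false =>
          cases h5 : PySem.Str.isIn "ipod" P with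
          | true => simp_all [pvTokens, List.foldl_cons, List.foldl_nil, List.any_cons, List.any_nil, pvIdx_ios, pvIdx_android, pvIdx_windows, pvIdx_macos, pvIdx_linux, pvIdx_mobile, pvIdx_desktop]
          | false =>
            cases h6 : PySem.Str.isIn "ipod" U with
            | true => simp_all [pvTokens, List.foldl_cons, List.foldl_nil, List.any_cons, List.any_nil, pvIdx_ios, pvIdx_android, pvIdx_windows, pvIdx_macos, pvIdx_linux, pvIdx_mobile, pvIdx_desktop]
            | false =>
              cases h7 : PySem.Str.isIn "android" P with
              | true => simp_all [pvTokens, List.foldl_cons, List.foldl_nil, List.any_cons, List.any_nil, pvIdx_ios, pvIdx_android, pvIdx_windows, pvIdx_macos, pvIdx_linux, pvIdx_mobile, pvIdx_desktop]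
              | false =>
                cases h8 : PySem.Str.isIn "android" U with
                | true => simp_all [pvTokens, List.foldl_cons, List.foldl_nil, List.any_cons, List.any_nil, pvIdx_ios, pvIdx_android, pvIdx_windows, pvIdx_macos, pvIdx_linux, pvIdx_mobile, pvIdx_desktop]
                | false =>
                  cases h9 : PySem.Str.isIn "windows" P with
                  | true => simp_all [pvTokens, List.foldl_cons, List.foldl_nil, List.any_cons, List.any_nil, pvIdx_ios, pvIdx_android, pvIdx_windows, pvIdx_macos, pvIdx_linux, pvIdx_mobile, pvIdx_desktop]
                  | false =>
                    cases h10 : PySem.Str.isIn "mac" P with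
                    | true => simp_all [pvTokens, List.foldl_cons, List.foldl_nil, List.any_cons, List.any_nil, pvIdx_ios, pvIdx_android, pvIdx_windows, pvIdx_macos, pvIdx_linux, pvIdx_mobile, pvIdx_desktop]
                    | false =>
                      cases h11 : PySem.Str.isIn "macintosh" P with
                      | true => simp_all [pvTokens, List.foldl_cons, List.foldl_nil, List.any_cons, List.any_nil, pvIdx_ios, pvIdx_android, pvIdx_windows, pvIdx_macos, pvIdx_linux, pvIdx_mobile, pvIdx_desktop]
                      | false =>
                        cases h12 : PySem.Str.isIn "linux" P with
                        | true => simp_all [pvTokens, List.foldl_cons, List.foldl_nil, List.any_cons, List.any_nil, pvIdx_ios, pvIdx_android, pvIdx_windows, pvIdx_macos, pvIdx_linux, pvIdx_mobile, pvIdx_desktop]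
                        | false =>
                          cases h13 : PySem.Str.isIn "mobile" U with
                          | true => simp_all [pvTokens, List.foldl_cons, List.foldl_nil, List.any_cons, List.any_nil, pvIdx_ios, pvIdx_android, pvIdx_windows, pvIdx_macos, pvIdx_linux, pvIdx_mobile, pvIdx_desktop]
                          | false =>
                            cases h14 : PySem.Str.isIn "tablet" U with
                            | true => simp_all [pvTokens, List.foldl_cons, List.foldl_nil, List.any_cons, List.any_nil, pvIdx_ios, pvIdx_android, pvIdx_windows, pvIdx_macos, pvIdx_linux, pvIdx_mobile, pvIdx_desktop]
                            | false => simp_all [pvTokens, List.foldl_cons, List.foldl_nil, List.any_cons, List.any_nil, pvIdx_ios, pvIdx_android, pvIdx_windows, pvIdx_macos, pvIdx_linux, pvIdx_mobile, pvIdx_desktop]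

-- ===== VERDICT =====
theorem get_device_type_spec : Claim_equal_get_device_type := by
  intro data _
  unfold Spec_get_device_type get_device_type get_device_type_alt
  cases h : data.find? (fun p => p.1 == "browser") with
  | none => rfl
  | some pb =>
    obtain ⟨_, browser⟩ := pb
    exact pvKey _ _
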